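-- pv_equiv track=rewrite | github.com/OuluBSD/SuperShader | process_effects_shaders.py | identify_effect_patterns
-- ===== SOURCE A (Python) =====
-- def identify_effect_patterns(shader_code):
--     """
--     Identify common effect patterns in shader code.
--
--     Args:
--         shader_code (str): GLSL code to analyze
--
--     Returns:
--         dict: Dictionary of identified effect patterns
--     """
--     patterns = {
--         # Color processing effects
--         'color_adjustments': 'color' in shader_code.lower() and ('adjust' in shader_code.lower() or 'correct' in shader_code.lower() or 'process' in shader_code.lower()),
--         'gamma_correction': 'gamma' in shader_code.lower(),
--         'brightness_contrast': 'brightness' in shader_code.lower() or 'contrast' in shader_code.lower(),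
--         'hue_saturation': 'hue' in shader_code.lower() or 'saturation' in shader_code.lower(),
--         'color_grading': 'color' in shader_code.lower() and ('grade' in shader_code.lower() or 'lut' in shader_code.lower()),
--
--         # Blur effects
--         'gaussian_blur': 'gaussian' in shader_code.lower() and 'blur' in shader_code.lower(),
--         'box_blur': 'box' in shader_code.lower() and 'blur' in shader_code.lower(),
--         'bilateral_blur': 'bilateral' in shader_code.lower() and 'blur' in shader_code.lower(),
--         'motion_blur': 'motion' in shader_code.lower() and 'blur' in shader_code.lower(),
--
--         # Distortion effects
--         'distortion': 'distort' in shader_code.lower(),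
--         'warping': 'warp' in shader_code.lower(),
--         'displacement': 'displace' in shader_code.lower(),
--
--         # Visual effects
--         'bloom': 'bloom' in shader_code.lower(),
--         'glow': 'glow' in shader_code.lower(),
--         'vignette': 'vignette' in shader_code.lower(),
--         'chromatic_aberration': 'chromatic' in shader_code.lower() and 'aberration' in shader_code.lower(),
--         'lens_flare': 'lens' in shader_code.lower() and 'flare' in shader_code.lower(),
--         'film_grain': 'film' in shader_code.lower() and 'grain' in shader_code.lower(),
--
--         # Post-processing effects
--         'fxaa': 'fxaa' in shader_code.lower(),
--         'taa': 'taa' in shader_code.lower() or ('temporal' in shader_code.lower() and 'anti' in shader_code.lower()),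
--         'ssao': 'ssao' in shader_code.lower() or ('screen' in shader_code.lower() and 'space' in shader_code.lower() and 'ambient' in shader_code.lower()),
--         'ssr': 'ssr' in shader_code.lower() or ('screen' in shader_code.lower() and 'space' in shader_code.lower() and 'reflection' in shader_code.lower()),
--         'dof': 'dof' in shader_code.lower() or ('depth' in shader_code.lower() and 'field' in shader_code.lower()),
--
--         # Filters and compositing
--         'filter': 'filter' in shader_code.lower(),
--         'composite': 'composite' in shader_code.lower() or 'compositing' in shader_code.lower(),
--         'threshold': 'threshold' in shader_code.lower(),
--
--         # Edge detection
--         'edge_detection': 'edge' in shader_code.lower() and ('detect' in shader_code.lower() or 'sobel' in shader_code.lower() or 'prewitt' in shader_code.lower()),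
--
--         # Special effects
--         'glitch': 'glitch' in shader_code.lower(),
--         'pixelation': 'pixel' in shader_code.lower() and 'size' in shader_code.lower(),
--         'scanlines': 'scanline' in shader_code.lower(),
--         'glitch_artifacts': 'glitch' in shader_code.lower() and ('shift' in shader_code.lower() or 'noise' in shader_code.lower()),
--     }
--
--     # Filter only the patterns that were found
--     active_patterns = {k: v for k, v in patterns.items() if v}
--     return active_patterns
-- ===== SOURCE B (Python) =====
-- # Different strategy: one position-scan over the lowercased code builds the set of
-- # keywords that occur (checking every keyword at each start index), then each
-- # pattern is decided purely by set membership over a declarative keyword-group table.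
--
-- _KEYWORDS = (
--     'color', 'adjust', 'correct', 'process', 'gamma', 'brightness', 'contrast',
--     'hue', 'saturation', 'grade', 'lut', 'gaussian', 'blur', 'box', 'bilateral',
--     'motion', 'distort', 'warp', 'displace', 'bloom', 'glow', 'vignette',
--     'chromatic', 'aberration', 'lens', 'flare', 'film', 'grain', 'fxaa', 'taa',
--     'temporal', 'anti', 'ssao', 'screen', 'space', 'ambient', 'ssr',
--     'reflection', 'dof', 'depth', 'field', 'filter', 'composite', 'compositing',
--     'threshold', 'edge', 'detect', 'sobel', 'prewitt', 'glitch', 'pixel',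
--     'size', 'scanline', 'shift', 'noise',
-- )
--
-- _TABLE = [
--     ('color_adjustments', [['color', 'adjust'], ['color', 'correct'], ['color', 'process']]),
--     ('gamma_correction', [['gamma']]),
--     ('brightness_contrast', [['brightness'], ['contrast']]),
--     ('hue_saturation', [['hue'], ['saturation']]),
--     ('color_grading', [['color', 'grade'], ['color', 'lut']]),
--     ('gaussian_blur', [['gaussian', 'blur']]),
--     ('box_blur', [['box', 'blur']]),
--     ('bilateral_blur', [['bilateral', 'blur']]),
--     ('motion_blur', [['motion', 'blur']]),
--     ('distortion', [['distort']]),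
--     ('warping', [['warp']]),
--     ('displacement', [['displace']]),
--     ('bloom', [['bloom']]),
--     ('glow', [['glow']]),
--     ('vignette', [['vignette']]),
--     ('chromatic_aberration', [['chromatic', 'aberration']]),
--     ('lens_flare', [['lens', 'flare']]),
--     ('film_grain', [['film', 'grain']]),
--     ('fxaa', [['fxaa']]),
--     ('taa', [['taa'], ['temporal', 'anti']]),
--     ('ssao', [['ssao'], ['screen', 'space', 'ambient']]),
--     ('ssr', [['ssr'], ['screen', 'space', 'reflection']]),
--     ('dof', [['dof'], ['depth', 'field']]),
--     ('filter', [['filter']]),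
--     ('composite', [['composite'], ['compositing']]),
--     ('threshold', [['threshold']]),
--     ('edge_detection', [['edge', 'detect'], ['edge', 'sobel'], ['edge', 'prewitt']]),
--     ('glitch', [['glitch']]),
--     ('pixelation', [['pixel', 'size']]),
--     ('scanlines', [['scanline']]),
--     ('glitch_artifacts', [['glitch', 'shift'], ['glitch', 'noise']]),
-- ]
--
--
-- def identify_effect_patterns(shader_code):
--     lc = shader_code.lower()
--     found = set()
--     for i in range(len(lc)):
--         for kw in _KEYWORDS:
--             if lc.startswith(kw, i):
--                 found.add(kw)
--     return {name: True
--             for name, groups in _TABLE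
--             if any(all(kw in found for kw in group) for group in groups)}
-- ===== Notes on version B (the rewrite author's own statement) =====
-- stated objective: alternative
-- what changed: Instead of A's 32 hand-written boolean expressions each substring-searching the (re-lowercased) code, B makes one scan over the positions of the lowercased code building the set of occurring keywords, then decides every pattern purely by set-membership tests against a declarative keyword-group table.
import Mathlib
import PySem

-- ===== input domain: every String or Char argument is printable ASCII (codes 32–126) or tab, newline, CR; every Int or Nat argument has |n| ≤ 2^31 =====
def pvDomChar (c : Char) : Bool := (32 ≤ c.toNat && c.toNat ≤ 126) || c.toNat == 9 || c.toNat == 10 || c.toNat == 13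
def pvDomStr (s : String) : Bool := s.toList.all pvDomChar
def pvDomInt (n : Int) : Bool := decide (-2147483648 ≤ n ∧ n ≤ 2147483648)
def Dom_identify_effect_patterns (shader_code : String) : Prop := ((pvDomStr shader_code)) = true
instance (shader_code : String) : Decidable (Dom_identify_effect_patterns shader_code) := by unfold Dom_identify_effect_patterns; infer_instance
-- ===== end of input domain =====

-- B replaces A's 32 hand-written substring-search expressions by a single position
-- scan that collects the set of occurring keywords, then a membership-driven table
-- evaluation; objective: alternative algorithm of similar cost, not faster.

-- ===== PORT A =====
-- literal transliteration: each dict value repeats `shader_code.lower()` as the source does;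
-- the comprehension keeping truthy values is the final filter (keys are distinct, so the
-- dict is exactly this association list).
def identify_effect_patterns (shader_code : String) : List (String × Bool) :=
  let patterns : List (String × Bool) :=
    [ ("color_adjustments", PySem.Str.isIn "color" (PySem.Str.lower shader_code) && (PySem.Str.isIn "adjust" (PySem.Str.lower shader_code) || PySem.Str.isIn "correct" (PySem.Str.lower shader_code) || PySem.Str.isIn "process" (PySem.Str.lower shader_code))),
      ("gamma_correction", PySem.Str.isIn "gamma" (PySem.Str.lower shader_code)),
      ("brightness_contrast", PySem.Str.isIn "brightness" (PySem.Str.lower shader_code) || PySem.Str.isIn "contrast" (PySem.Str.lower shader_code)),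
      ("hue_saturation", PySem.Str.isIn "hue" (PySem.Str.lower shader_code) || PySem.Str.isIn "saturation" (PySem.Str.lower shader_code)),
      ("color_grading", PySem.Str.isIn "color" (PySem.Str.lower shader_code) && (PySem.Str.isIn "grade" (PySem.Str.lower shader_code) || PySem.Str.isIn "lut" (PySem.Str.lower shader_code))),
      ("gaussian_blur", PySem.Str.isIn "gaussian" (PySem.Str.lower shader_code) && PySem.Str.isIn "blur" (PySem.Str.lower shader_code)),
      ("box_blur", PySem.Str.isIn "box" (PySem.Str.lower shader_code) && PySem.Str.isIn "blur" (PySem.Str.lower shader_code)),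
      ("bilateral_blur", PySem.Str.isIn "bilateral" (PySem.Str.lower shader_code) && PySem.Str.isIn "blur" (PySem.Str.lower shader_code)),
      ("motion_blur", PySem.Str.isIn "motion" (PySem.Str.lower shader_code) && PySem.Str.isIn "blur" (PySem.Str.lower shader_code)),
      ("distortion", PySem.Str.isIn "distort" (PySem.Str.lower shader_code)),
      ("warping", PySem.Str.isIn "warp" (PySem.Str.lower shader_code)),
      ("displacement", PySem.Str.isIn "displace" (PySem.Str.lower shader_code)),
      ("bloom", PySem.Str.isIn "bloom" (PySem.Str.lower shader_code)),
      ("glow", PySem.Str.isIn "glow" (PySem.Str.lower shader_code)),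
      ("vignette", PySem.Str.isIn "vignette" (PySem.Str.lower shader_code)),
      ("chromatic_aberration", PySem.Str.isIn "chromatic" (PySem.Str.lower shader_code) && PySem.Str.isIn "aberration" (PySem.Str.lower shader_code)),
      ("lens_flare", PySem.Str.isIn "lens" (PySem.Str.lower shader_code) && PySem.Str.isIn "flare" (PySem.Str.lower shader_code)),
      ("film_grain", PySem.Str.isIn "film" (PySem.Str.lower shader_code) && PySem.Str.isIn "grain" (PySem.Str.lower shader_code)),
      ("fxaa", PySem.Str.isIn "fxaa" (PySem.Str.lower shader_code)),
      ("taa", PySem.Str.isIn "taa" (PySem.Str.lower shader_code) || (PySem.Str.isIn "temporal" (PySem.Str.lower shader_code) && PySem.Str.isIn "anti" (PySem.Str.lower shader_code))),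
      ("ssao", PySem.Str.isIn "ssao" (PySem.Str.lower shader_code) || (PySem.Str.isIn "screen" (PySem.Str.lower shader_code) && PySem.Str.isIn "space" (PySem.Str.lower shader_code) && PySem.Str.isIn "ambient" (PySem.Str.lower shader_code))),
      ("ssr", PySem.Str.isIn "ssr" (PySem.Str.lower shader_code) || (PySem.Str.isIn "screen" (PySem.Str.lower shader_code) && PySem.Str.isIn "space" (PySem.Str.lower shader_code) && PySem.Str.isIn "reflection" (PySem.Str.lower shader_code))),
      ("dof", PySem.Str.isIn "dof" (PySem.Str.lower shader_code) || (PySem.Str.isIn "depth" (PySem.Str.lower shader_code) && PySem.Str.isIn "field" (PySem.Str.lower shader_code))),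
      ("filter", PySem.Str.isIn "filter" (PySem.Str.lower shader_code)),
      ("composite", PySem.Str.isIn "composite" (PySem.Str.lower shader_code) || PySem.Str.isIn "compositing" (PySem.Str.lower shader_code)),
      ("threshold", PySem.Str.isIn "threshold" (PySem.Str.lower shader_code)),
      ("edge_detection", PySem.Str.isIn "edge" (PySem.Str.lower shader_code) && (PySem.Str.isIn "detect" (PySem.Str.lower shader_code) || PySem.Str.isIn "sobel" (PySem.Str.lower shader_code) || PySem.Str.isIn "prewitt" (PySem.Str.lower shader_code))),
      ("glitch", PySem.Str.isIn "glitch" (PySem.Str.lower shader_code)),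
      ("pixelation", PySem.Str.isIn "pixel" (PySem.Str.lower shader_code) && PySem.Str.isIn "size" (PySem.Str.lower shader_code)),
      ("scanlines", PySem.Str.isIn "scanline" (PySem.Str.lower shader_code)),
      ("glitch_artifacts", PySem.Str.isIn "glitch" (PySem.Str.lower shader_code) && (PySem.Str.isIn "shift" (PySem.Str.lower shader_code) || PySem.Str.isIn "noise" (PySem.Str.lower shader_code))) ]
  patterns.filter (fun kv => kv.2)

-- ===== PORT B =====
def pvKeywords : List String :=
  [ "color", "adjust", "correct", "process", "gamma", "brightness", "contrast",
    "hue", "saturation", "grade", "lut", "gaussian", "blur", "box", "bilateral",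
    "motion", "distort", "warp", "displace", "bloom", "glow", "vignette",
    "chromatic", "aberration", "lens", "flare", "film", "grain", "fxaa", "taa",
    "temporal", "anti", "ssao", "screen", "space", "ambient", "ssr",
    "reflection", "dof", "depth", "field", "filter", "composite", "compositing",
    "threshold", "edge", "detect", "sobel", "prewitt", "glitch", "pixel",
    "size", "scanline", "shift", "noise" ]

def pvEffectTable : List (String × List (List String)) :=
  [ ("color_adjustments", [["color", "adjust"], ["color", "correct"], ["color", "process"]]),
    ("gamma_correction", [["gamma"]]),
    ("brightness_contrast", [["brightness"], ["contrast"]]),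
    ("hue_saturation", [["hue"], ["saturation"]]),
    ("color_grading", [["color", "grade"], ["color", "lut"]]),
    ("gaussian_blur", [["gaussian", "blur"]]),
    ("box_blur", [["box", "blur"]]),
    ("bilateral_blur", [["bilateral", "blur"]]),
    ("motion_blur", [["motion", "blur"]]),
    ("distortion", [["distort"]]),
    ("warping", [["warp"]]),
    ("displacement", [["displace"]]),
    ("bloom", [["bloom"]]),
    ("glow", [["glow"]]),
    ("vignette", [["vignette"]]),
    ("chromatic_aberration", [["chromatic", "aberration"]]),
    ("lens_flare", [["lens", "flare"]]),
    ("film_grain", [["film", "grain"]]),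
    ("fxaa", [["fxaa"]]),
    ("taa", [["taa"], ["temporal", "anti"]]),
    ("ssao", [["ssao"], ["screen", "space", "ambient"]]),
    ("ssr", [["ssr"], ["screen", "space", "reflection"]]),
    ("dof", [["dof"], ["depth", "field"]]),
    ("filter", [["filter"]]),
    ("composite", [["composite"], ["compositing"]]),
    ("threshold", [["threshold"]]),
    ("edge_detection", [["edge", "detect"], ["edge", "sobel"], ["edge", "prewitt"]]),
    ("glitch", [["glitch"]]),
    ("pixelation", [["pixel", "size"]]),
    ("scanlines", [["scanline"]]),
    ("glitch_artifacts", [["glitch", "shift"], ["glitch", "noise"]]) ]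

-- Source B's position scan: for i in range(len(lc)): for kw in _KEYWORDS: if lc.startswith(kw, i): found.add(kw)
-- exact by hand: lc.startswith(kw, i) with 0 ≤ i < len(lc) is the prefix test on cs.drop i
def pvScanFound (cs : List Char) : PySem.Set String :=
  (List.range cs.length).foldl
    (fun s i => pvKeywords.foldl
      (fun s kw => if PySem.Chars.startswith (cs.drop i) kw.toList then PySem.Set.add s kw else s) s)
    PySem.Set.empty

def identify_effect_patterns_alt (shader_code : String) : List (String × Bool) :=
  let cs := (PySem.Str.lower shader_code).toList
  let found := pvScanFound cs
  (pvEffectTable.filter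
      (fun e => e.2.any (fun g => g.all (fun kw => PySem.Set.contains found kw)))).map
    (fun e => (e.1, true))

-- ===== PRECONDITION & SPEC =====
def Spec_identify_effect_patterns (shader_code : String) (out : List (String × Bool)) : Prop := out = identify_effect_patterns_alt shader_code
instance (shader_code : String) (out : List (String × Bool)) : Decidable (Spec_identify_effect_patterns shader_code out) := by unfold Spec_identify_effect_patterns; infer_instance

-- ===== CLAIM (what is proved, stated in full; the proofs are below) =====
def Claim_equal_identify_effect_patterns : Prop := ∀ (shader_code : String), Dom_identify_effect_patterns shader_code → Spec_identify_effect_patterns shader_code (identify_effect_patterns shader_code)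

-- ===== LEMMAS AND PROOFS =====

-- membership after the inner keyword loop at one position
theorem pv_mem_inner (cs : List Char) (i : Nat) (ks : List String) (s : PySem.Set String) (k : String) :
    (k ∈ ks.foldl (fun s kw => if PySem.Chars.startswith (cs.drop i) kw.toList then PySem.Set.add s kw else s) s)
    ↔ k ∈ s ∨ (k ∈ ks ∧ PySem.Chars.startswith (cs.drop i) k.toList = true) := by
  induction ks generalizing s with
  | nil => simp
  | cons kw t ih =>
    simp only [List.foldl_cons, ih]
    by_cases h : PySem.Chars.startswith (cs.drop i) kw.toList = true
    · simp only [if_pos h, PySem.Set.mem_add, List.mem_cons]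
      constructor
      · rintro (⟨hk | rfl⟩ | ⟨hk, hs⟩)
        · exact Or.inl hk
        · exact Or.inr ⟨Or.inl rfl, h⟩
        · exact Or.inr ⟨Or.inr hk, hs⟩
      · rintro (hk | ⟨(rfl | hk), hs⟩)
        · exact Or.inl (Or.inl hk)
        · exact Or.inl (Or.inr rfl)
        · exact Or.inr ⟨hk, hs⟩
    · simp only [if_neg h, List.mem_cons]
      constructor
      · rintro (hk | ⟨hk, hs⟩)
        · exact Or.inl hk
        · exact Or.inr ⟨Or.inr hk, hs⟩
      · rintro (hk | ⟨(rfl | hk), hs⟩)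
        · exact Or.inl hk
        · exact absurd hs h
        · exact Or.inr ⟨hk, hs⟩

-- membership after the whole position scan
theorem pv_mem_outer (cs : List Char) (idxs : List Nat) (s : PySem.Set String) (k : String) :
    (k ∈ idxs.foldl
        (fun s i => pvKeywords.foldl
          (fun s kw => if PySem.Chars.startswith (cs.drop i) kw.toList then PySem.Set.add s kw else s) s) s)
    ↔ k ∈ s ∨ (k ∈ pvKeywords ∧ ∃ i ∈ idxs, PySem.Chars.startswith (cs.drop i) k.toList = true) := by
  induction idxs generalizing s with
  | nil => simp
  | cons j t ih =>
    simp only [List.foldl_cons, ih, pv_mem_inner, List.mem_cons]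
    constructor
    · rintro ((hk | ⟨hk, hs⟩) | ⟨hk, i, hi, hs⟩)
      · exact Or.inl hk
      · exact Or.inr ⟨hk, j, Or.inl rfl, hs⟩
      · exact Or.inr ⟨hk, i, Or.inr hi, hs⟩
    · rintro (hk | ⟨hk, i, (rfl | hi), hs⟩)
      · exact Or.inl (Or.inl hk)
      · exact Or.inl (Or.inr ⟨hk, hs⟩)
      · exact Or.inr ⟨hk, i, hi, hs⟩

-- a keyword of the list is found by the scan exactly when it occurs as a substring
theorem pv_found_contains (cs : List Char) (k : String)
    (hk : k ∈ pvKeywords) (hne : k.toList ≠ []) :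
    PySem.Set.contains (pvScanFound cs) k = PySem.Chars.isIn k.toList cs := by
  rw [Bool.eq_iff_iff, PySem.Set.contains_iff, ← PySem.Chars.exists_prefix_drop_iff_isIn]
  unfold pvScanFound
  rw [pv_mem_outer]
  constructor
  · rintro (h | ⟨-, i, -, hs⟩)
    · simp [PySem.Set.empty] at h
    · exact ⟨i, (PySem.Chars.startswith_iff _ _).mp hs⟩
  · rintro ⟨j, hj⟩
    by_cases hlt : j < cs.length
    · exact Or.inr ⟨hk, j, List.mem_range.mpr hlt,
        (PySem.Chars.startswith_iff _ _).mpr hj⟩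
    · exfalso
      rw [List.drop_eq_nil_of_le (le_of_not_gt hlt)] at hj
      exact hne (List.prefix_nil.mp hj)

-- every keyword appearing in the table is in the scanned keyword list and nonempty
theorem pv_table_kw_ok :
    ∀ e ∈ pvEffectTable, ∀ g ∈ e.2, ∀ kw ∈ g, kw ∈ pvKeywords ∧ kw.toList ≠ [] := by
  decide

-- the table predicate over the scan's found-set equals the one over substring search
theorem pv_pred_congr (cs : List Char) :
    ∀ e ∈ pvEffectTable,
      (e.2.any (fun g => g.all (fun kw => PySem.Set.contains (pvScanFound cs) kw)))
      = e.2.any (fun g => g.all (fun kw => PySem.Chars.isIn kw.toList cs)) := by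
  intro e he
  rw [Bool.eq_iff_iff]
  simp only [List.any_eq_true, List.all_eq_true]
  constructor <;> rintro ⟨g, hg, hall⟩ <;> refine ⟨g, hg, fun kw hkw => ?_⟩
  · have h := pv_table_kw_ok e he g hg kw hkw
    rw [← pv_found_contains cs kw h.1 h.2]
    exact hall kw hkw
  · have h := pv_table_kw_ok e he g hg kw hkw
    rw [pv_found_contains cs kw h.1 h.2]
    exact hall kw hkw

-- A's pairs list is the table evaluated entrywise by substring search
set_option maxRecDepth 4000 in
theorem pv_patterns_eq_table_eval (shader_code : String) :
    (    [ ("color_adjustments", PySem.Str.isIn "color" (PySem.Str.lower shader_code) && (PySem.Str.isIn "adjust" (PySem.Str.lower shader_code) || PySem.Str.isIn "correct" (PySem.Str.lower shader_code) || PySem.Str.isIn "process" (PySem.Str.lower shader_code))),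
       ("gamma_correction", PySem.Str.isIn "gamma" (PySem.Str.lower shader_code)),
       ("brightness_contrast", PySem.Str.isIn "brightness" (PySem.Str.lower shader_code) || PySem.Str.isIn "contrast" (PySem.Str.lower shader_code)),
       ("hue_saturation", PySem.Str.isIn "hue" (PySem.Str.lower shader_code) || PySem.Str.isIn "saturation" (PySem.Str.lower shader_code)),
       ("color_grading", PySem.Str.isIn "color" (PySem.Str.lower shader_code) && (PySem.Str.isIn "grade" (PySem.Str.lower shader_code) || PySem.Str.isIn "lut" (PySem.Str.lower shader_code))),
       ("gaussian_blur", PySem.Str.isIn "gaussian" (PySem.Str.lower shader_code) && PySem.Str.isIn "blur" (PySem.Str.lower shader_code)),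
       ("box_blur", PySem.Str.isIn "box" (PySem.Str.lower shader_code) && PySem.Str.isIn "blur" (PySem.Str.lower shader_code)),
       ("bilateral_blur", PySem.Str.isIn "bilateral" (PySem.Str.lower shader_code) && PySem.Str.isIn "blur" (PySem.Str.lower shader_code)),
       ("motion_blur", PySem.Str.isIn "motion" (PySem.Str.lower shader_code) && PySem.Str.isIn "blur" (PySem.Str.lower shader_code)),
       ("distortion", PySem.Str.isIn "distort" (PySem.Str.lower shader_code)),
       ("warping", PySem.Str.isIn "warp" (PySem.Str.lower shader_code)),
       ("displacement", PySem.Str.isIn "displace" (PySem.Str.lower shader_code)),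
       ("bloom", PySem.Str.isIn "bloom" (PySem.Str.lower shader_code)),
       ("glow", PySem.Str.isIn "glow" (PySem.Str.lower shader_code)),
       ("vignette", PySem.Str.isIn "vignette" (PySem.Str.lower shader_code)),
       ("chromatic_aberration", PySem.Str.isIn "chromatic" (PySem.Str.lower shader_code) && PySem.Str.isIn "aberration" (PySem.Str.lower shader_code)),
       ("lens_flare", PySem.Str.isIn "lens" (PySem.Str.lower shader_code) && PySem.Str.isIn "flare" (PySem.Str.lower shader_code)),
       ("film_grain", PySem.Str.isIn "film" (PySem.Str.lower shader_code) && PySem.Str.isIn "grain" (PySem.Str.lower shader_code)),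
       ("fxaa", PySem.Str.isIn "fxaa" (PySem.Str.lower shader_code)),
       ("taa", PySem.Str.isIn "taa" (PySem.Str.lower shader_code) || (PySem.Str.isIn "temporal" (PySem.Str.lower shader_code) && PySem.Str.isIn "anti" (PySem.Str.lower shader_code))),
       ("ssao", PySem.Str.isIn "ssao" (PySem.Str.lower shader_code) || (PySem.Str.isIn "screen" (PySem.Str.lower shader_code) && PySem.Str.isIn "space" (PySem.Str.lower shader_code) && PySem.Str.isIn "ambient" (PySem.Str.lower shader_code))),
       ("ssr", PySem.Str.isIn "ssr" (PySem.Str.lower shader_code) || (PySem.Str.isIn "screen" (PySem.Str.lower shader_code) && PySem.Str.isIn "space" (PySem.Str.lower shader_code) && PySem.Str.isIn "reflection" (PySem.Str.lower shader_code))),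
       ("dof", PySem.Str.isIn "dof" (PySem.Str.lower shader_code) || (PySem.Str.isIn "depth" (PySem.Str.lower shader_code) && PySem.Str.isIn "field" (PySem.Str.lower shader_code))),
       ("filter", PySem.Str.isIn "filter" (PySem.Str.lower shader_code)),
       ("composite", PySem.Str.isIn "composite" (PySem.Str.lower shader_code) || PySem.Str.isIn "compositing" (PySem.Str.lower shader_code)),
       ("threshold", PySem.Str.isIn "threshold" (PySem.Str.lower shader_code)),
       ("edge_detection", PySem.Str.isIn "edge" (PySem.Str.lower shader_code) && (PySem.Str.isIn "detect" (PySem.Str.lower shader_code) || PySem.Str.isIn "sobel" (PySem.Str.lower shader_code) || PySem.Str.isIn "prewitt" (PySem.Str.lower shader_code))),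
       ("glitch", PySem.Str.isIn "glitch" (PySem.Str.lower shader_code)),
       ("pixelation", PySem.Str.isIn "pixel" (PySem.Str.lower shader_code) && PySem.Str.isIn "size" (PySem.Str.lower shader_code)),
       ("scanlines", PySem.Str.isIn "scanline" (PySem.Str.lower shader_code)),
       ("glitch_artifacts", PySem.Str.isIn "glitch" (PySem.Str.lower shader_code) && (PySem.Str.isIn "shift" (PySem.Str.lower shader_code) || PySem.Str.isIn "noise" (PySem.Str.lower shader_code))) ])
      = pvEffectTable.map (fun e =>
          (e.1, e.2.any (fun g => g.all (fun kw =>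
            PySem.Chars.isIn kw.toList ((PySem.Str.lower shader_code).toList))))) := by
  simp only [pvEffectTable, List.map_cons, List.map_nil, List.any_cons, List.any_nil,
    List.all_cons, List.all_nil, PySem.Str.isIn_eq, Bool.and_true, Bool.or_false,
    Bool.and_or_distrib_left, Bool.and_assoc, Bool.or_assoc]

-- ===== VERDICT (by name: the statement is the Claim_ definition above) =====
theorem identify_effect_patterns_spec : Claim_equal_identify_effect_patterns := by
  intro shader_code _
  show identify_effect_patterns shader_code = identify_effect_patterns_alt shader_code
  unfold identify_effect_patterns identify_effect_patterns_alt
  rw [pv_patterns_eq_table_eval, List.filter_map]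
  simp only [Function.comp_def]
  rw [List.filter_congr (fun e he =>
        (pv_pred_congr ((PySem.Str.lower shader_code).toList) e he).symm)]
  apply List.map_congr_left
  intro e he
  obtain ⟨hmem, h2⟩ := List.mem_filter.mp he
  rw [pv_pred_congr ((PySem.Str.lower shader_code).toList) e hmem] at h2
  rw [h2]
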